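-- pv_equiv track=rewrite | github.com/Julien-Devos/LINFO1101-Intro-programmation | [INFO1] Informatique 1 - Introduction à la programmation/Session 03/QBF.py | chiffres_pairs
-- ===== SOURCE A (Python) =====
-- def chiffres_pairs(n):
--     """ Retourne True si le nombre de chiffres de n est pair et False si non
--
--         Args:
--             n: int: un entier
--
--         Returns:
--             True si le nombre de chiffres de n est pair et False si non
--     """
--     count = 1
--     while n >= 10:
--         n //= 10
--         count += 1
--     if count % 2 == 0:
--         return True
--     return False
-- ===== SOURCE B (Python) =====
-- def chiffres_pairs(n):
--     return n >= 10 and len(str(n)) % 2 == 0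
-- ===== Notes on version B (the rewrite author's own statement) =====
-- stated objective: simpler
-- what changed: Replaces the digit-counting division loop with the length of the decimal string representation: single-digit (and negative) inputs are odd immediately, otherwise the parity of len(str(n)) is the answer.
import Mathlib
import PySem

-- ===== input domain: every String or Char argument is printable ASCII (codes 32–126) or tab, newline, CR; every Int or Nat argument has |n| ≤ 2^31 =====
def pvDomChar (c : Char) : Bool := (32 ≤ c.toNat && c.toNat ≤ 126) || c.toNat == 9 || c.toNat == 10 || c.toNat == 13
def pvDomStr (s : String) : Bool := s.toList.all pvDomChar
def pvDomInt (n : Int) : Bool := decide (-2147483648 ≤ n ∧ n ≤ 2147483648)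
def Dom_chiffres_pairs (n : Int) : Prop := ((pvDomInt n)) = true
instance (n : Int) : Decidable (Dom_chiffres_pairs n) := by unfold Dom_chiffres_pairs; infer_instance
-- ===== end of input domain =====

-- B replaces the digit-counting division loop by the length of str(n): any n < 10 has one digit (odd), else the parity of len(str(n)) is the answer.
-- ===== PORT A =====
-- while n >= 10: n //= 10; count += 1  — returns final count
def chiffresLoopA (n count : Int) : Int :=
  if h : n ≥ 10 then chiffresLoopA (PySem.Int.floordiv n 10) (count + 1) else count
termination_by n.toNat
decreasing_by
  have h10 : PySem.Int.floordiv n 10 = n / 10 := PySem.Int.floordiv_eq_ediv_of_pos (by omega)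
  simp only [h10]; omega

def chiffres_pairs (n : Int) : Bool :=
  if PySem.Int.mod (chiffresLoopA n 1) 2 == 0 then true else false

-- ===== PORT B =====
-- return n >= 10 and len(str(n)) % 2 == 0
def chiffres_pairs_alt (n : Int) : Bool :=
  decide (n ≥ 10) && (PySem.Int.mod (PySem.Str.len (PySem.Int.toStr n)) 2 == 0)

-- ===== PRECONDITION & SPEC =====
def Spec_chiffres_pairs (n : Int) (out : Bool) : Prop := out = chiffres_pairs_alt n
instance (n : Int) (out : Bool) : Decidable (Spec_chiffres_pairs n out) := by unfold Spec_chiffres_pairs; infer_instance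

-- ===== CLAIM (what is proved, stated in full; the proofs are below) =====
def Claim_equal_chiffres_pairs : Prop := ∀ (n : Int), Dom_chiffres_pairs n → Spec_chiffres_pairs n (chiffres_pairs n)

-- ===== LEMMAS AND PROOFS =====
-- digit count of a natural number, the proof-side reference
def digitsLen (m : Nat) : Nat :=
  if m < 10 then 1 else digitsLen (m / 10) + 1
decreasing_by omega

theorem loopA_eq_digitsLen (n c : Int) (hn : 0 ≤ n) :
    chiffresLoopA n c = (digitsLen n.toNat : Int) + c - 1 := by
  rw [chiffresLoopA, digitsLen]
  by_cases h : n ≥ 10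
  · have e1 : PySem.Int.floordiv n 10 = n / 10 := PySem.Int.floordiv_eq_ediv_of_pos (by omega)
    rw [dif_pos h, e1, loopA_eq_digitsLen (n / 10) (c + 1) (by omega)]
    have hx : ¬ n.toNat < 10 := by omega
    have hd : (n / 10).toNat = n.toNat / 10 := by omega
    rw [if_neg hx, hd]
    push_cast
    ring
  · have hx : n.toNat < 10 := by omega
    rw [dif_neg h, if_pos hx]
    omega
termination_by n.toNat
decreasing_by omega

theorem toDigitsCore_len (f m : Nat) (l : List Char) (hf : m < f) :
    (Nat.toDigitsCore 10 f m l).length = digitsLen m + l.length := by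
  match f with
  | f + 1 =>
    rw [Nat.toDigitsCore, digitsLen]
    by_cases h : m / 10 = 0
    · have : m < 10 := by omega
      simp [h, this]
      omega
    · have hm : ¬ m < 10 := by omega
      have : m / 10 < f := by omega
      rw [if_neg h, if_neg hm, toDigitsCore_len f (m / 10) _ this]
      simp
      omega

theorem toDigits_len (m : Nat) : (Nat.toDigits 10 m).length = digitsLen m :=
  by simpa using toDigitsCore_len (m + 1) m [] (by omega)

-- ===== VERDICT (by name: the statement is the Claim_ definition above) =====
theorem chiffres_pairs_spec : Claim_equal_chiffres_pairs := by
  intro n _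
  unfold Spec_chiffres_pairs chiffres_pairs chiffres_pairs_alt
  by_cases h : n ≥ 10
  · have hlen : PySem.Str.len (PySem.Int.toStr n) = (digitsLen n.toNat : Int) := by
      rw [PySem.Str.len, PySem.Int.toList_toStr, PySem.Int.toChars, if_neg (by omega : ¬ n < 0),
        toDigits_len]
    rw [hlen, loopA_eq_digitsLen n 1 (by omega)]
    have he : (digitsLen n.toNat : Int) + 1 - 1 = (digitsLen n.toNat : Int) := by ring
    rw [he]
    have hd : decide (n ≥ 10) = true := by simp [h]
    rw [hd, Bool.true_and]
    cases hb : (PySem.Int.mod (digitsLen n.toNat : Int) 2 == 0) <;> simp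
  · rw [chiffresLoopA, dif_neg h]
    simp [PySem.Int.mod, h]
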